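-- pv_equiv track=rewrite | github.com/jlunder00/TMN_DataGen | scripts/full_test_parallel.py | create_test_data
-- ===== SOURCE A (Python) =====
-- from typing import List, Tuple, Dict, Any
--
-- def create_test_data(size: int = 30) -> Tuple[List[Tuple[str, str]], List[str]]:
--     """Create test sentence pairs and labels"""
--     base_sentences = [
--         ("The cat sits on the mat.", "A feline rests on a rug."),
--         ("Dogs love to play fetch.", "Canines enjoy playing with balls."),
--         ("Birds can fly high in the sky.", "Avians soar through the atmosphere."),
--         ("Fish swim in the deep ocean.", "Marine life inhabits the sea."),
--         ("The sun shines brightly today.", "Sunlight illuminates the day."),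
--         ("Children enjoy reading books.", "Kids like to read stories."),
--         ("Music brings joy to people.", "Songs make people happy."),
--         ("Flowers bloom in spring.", "Blossoms appear in springtime."),
--         ("Cars drive on the highway.", "Vehicles travel on roads."),
--         ("Students learn in school.", "Pupils study in classrooms."),
--         ("The rain falls gently.", "Water drops softly from clouds."),
--         ("Scientists conduct experiments.", "Researchers perform tests."),
--         ("Artists create beautiful paintings.", "Painters make lovely artwork."),
--         ("Chefs cook delicious meals.", "Cooks prepare tasty food."),
--     ]
--
--     base_labels = ["entailment", "neutral", "contradiction"]
--
--     # Generate test pairs by cycling through available sentences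
--     text_pairs = []
--     test_labels = []
--
--     for i in range(size):
--         sentence_pair = base_sentences[i % len(base_sentences)]
--         text_pairs.append(sentence_pair)
--         test_labels.append(base_labels[i % len(base_labels)])
--
--     return text_pairs, test_labels
-- ===== SOURCE B (Python) =====
-- from typing import List, Tuple, Dict, Any
--
-- def create_test_data(size: int = 30) -> Tuple[List[Tuple[str, str]], List[str]]:
--     """Create test sentence pairs and labels"""
--     base_sentences = [
--         ("The cat sits on the mat.", "A feline rests on a rug."),
--         ("Dogs love to play fetch.", "Canines enjoy playing with balls."),
--         ("Birds can fly high in the sky.", "Avians soar through the atmosphere."),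
--         ("Fish swim in the deep ocean.", "Marine life inhabits the sea."),
--         ("The sun shines brightly today.", "Sunlight illuminates the day."),
--         ("Children enjoy reading books.", "Kids like to read stories."),
--         ("Music brings joy to people.", "Songs make people happy."),
--         ("Flowers bloom in spring.", "Blossoms appear in springtime."),
--         ("Cars drive on the highway.", "Vehicles travel on roads."),
--         ("Students learn in school.", "Pupils study in classrooms."),
--         ("The rain falls gently.", "Water drops softly from clouds."),
--         ("Scientists conduct experiments.", "Researchers perform tests."),
--         ("Artists create beautiful paintings.", "Painters make lovely artwork."),
--         ("Chefs cook delicious meals.", "Cooks prepare tasty food."),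
--     ]
--     base_labels = ["entailment", "neutral", "contradiction"]
--     # replicate each base list enough times, then slice to exactly `size`
--     reps_pairs = -(-size // len(base_sentences))
--     reps_labels = -(-size // len(base_labels))
--     text_pairs = (base_sentences * reps_pairs)[:size]
--     test_labels = (base_labels * reps_labels)[:size]
--     return text_pairs, test_labels
-- ===== Notes on version B (the rewrite author's own statement) =====
-- stated objective: alternative
-- what changed: Replaces the shared counted loop with per-element modulo indexing by building each output list independently via list replication (ceil(size/len) copies) and slicing to exactly size elements.
import Mathlib
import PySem

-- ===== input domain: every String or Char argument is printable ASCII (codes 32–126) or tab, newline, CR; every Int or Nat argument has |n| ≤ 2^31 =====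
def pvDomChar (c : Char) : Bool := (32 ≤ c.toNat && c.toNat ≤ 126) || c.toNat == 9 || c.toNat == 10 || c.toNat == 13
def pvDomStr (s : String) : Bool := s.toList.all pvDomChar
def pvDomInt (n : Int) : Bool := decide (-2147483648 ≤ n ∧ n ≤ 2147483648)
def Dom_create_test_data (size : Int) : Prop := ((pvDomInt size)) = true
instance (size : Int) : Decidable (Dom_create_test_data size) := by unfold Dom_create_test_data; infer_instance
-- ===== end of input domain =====

-- B replaces A's shared counted loop (per-index modulo lookups) by building each list
-- independently: replicate the base list ceil(size/len) times and slice to size (alternative decomposition, same cost).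

-- ===== PORT A =====
def baseSentences : List (String × String) := [
        ("The cat sits on the mat.", "A feline rests on a rug.") ,
        ("Dogs love to play fetch.", "Canines enjoy playing with balls.") ,
        ("Birds can fly high in the sky.", "Avians soar through the atmosphere.") ,
        ("Fish swim in the deep ocean.", "Marine life inhabits the sea.") ,
        ("The sun shines brightly today.", "Sunlight illuminates the day.") ,
        ("Children enjoy reading books.", "Kids like to read stories.") ,
        ("Music brings joy to people.", "Songs make people happy.") ,
        ("Flowers bloom in spring.", "Blossoms appear in springtime.") ,
        ("Cars drive on the highway.", "Vehicles travel on roads.") ,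
        ("Students learn in school.", "Pupils study in classrooms.") ,
        ("The rain falls gently.", "Water drops softly from clouds.") ,
        ("Scientists conduct experiments.", "Researchers perform tests.") ,
        ("Artists create beautiful paintings.", "Painters make lovely artwork.") ,
        ("Chefs cook delicious meals.", "Cooks prepare tasty food.")]

def baseLabels : List String := ["entailment", "neutral", "contradiction"]

-- the for-loop: one fold over range(size), appending to both accumulators
-- (pyGetD's default is never used: i % len is always in range)
def create_test_data (size : Int) : (List (String × String)) × List String :=
  (PySem.List.pyRange 0 size 1).foldl
    (fun acc i =>
      let sentence_pair := PySem.List.pyGetD baseSentences (PySem.Int.mod i (baseSentences.length : Int)) ("", "")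
      (acc.1 ++ [sentence_pair],
       acc.2 ++ [PySem.List.pyGetD baseLabels (PySem.Int.mod i (baseLabels.length : Int)) ""]))
    ([], [])

-- ===== PORT B =====
-- list * k  (k may be ≤ 0: empty, as in Python)
def pyListMul {α : Type} (l : List α) (k : Int) : List α :=
  (List.replicate k.toNat l).flatten

def create_test_data_alt (size : Int) : (List (String × String)) × List String :=
  let reps_pairs := -(PySem.Int.floordiv (-size) (baseSentences.length : Int))
  let reps_labels := -(PySem.Int.floordiv (-size) (baseLabels.length : Int))
  (PySem.List.slice (pyListMul baseSentences reps_pairs) none (some size),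
   PySem.List.slice (pyListMul baseLabels reps_labels) none (some size))

-- ===== PRECONDITION & SPEC =====
def Spec_create_test_data (size : Int) (out : (List (String × String)) × List String) : Prop := out = create_test_data_alt size
instance (size : Int) (out : (List (String × String)) × List String) : Decidable (Spec_create_test_data size out) := by unfold Spec_create_test_data; infer_instance

-- ===== CLAIM (what is proved, stated in full; the proofs are below) =====
def Claim_equal_create_test_data : Prop := ∀ (size : Int), Dom_create_test_data size → Spec_create_test_data size (create_test_data size)

-- ===== LEMMAS AND PROOFS =====

-- cyclic indexing into a replicated list
theorem flatten_replicate_getElem? {α : Type} (b : List α) (hb : b ≠ []) :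
    ∀ (k n : Nat), n < k * b.length →
      ((List.replicate k b).flatten)[n]? = b[n % b.length]? := by
  intro k
  induction k with
  | zero => intro n h; omega
  | succ k ih =>
    intro n h
    have hlen : 0 < b.length := List.length_pos_iff.mpr hb
    rw [List.replicate_succ, List.flatten_cons]
    rw [List.getElem?_append]
    rw [Nat.succ_mul] at h
    by_cases hn : n < b.length
    · rw [if_pos hn, Nat.mod_eq_of_lt hn]
    · rw [if_neg hn]
      push Not at hn
      rw [ih (n - b.length) (by omega)]
      congr 1
      conv_rhs => rw [show n = (n - b.length) + b.length by omega]
      rw [Nat.add_mod_right]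

-- taking n elements is stable under adding more copies (n within the first k copies)
theorem take_flatten_replicate_mono {α : Type} (b : List α) (n k k' : Nat)
    (hk : k ≤ k') (hlen : n ≤ k * b.length) :
    ((List.replicate k' b).flatten).take n = ((List.replicate k b).flatten).take n := by
  obtain ⟨d, rfl⟩ := Nat.exists_eq_add_of_le hk
  rw [List.replicate_add, List.flatten_append, List.take_append_of_le_length]
  simpa using hlen

-- Nat ceiling division, as B computes it
def ceilDiv (n m : Nat) : Nat := (n + m - 1) / m

theorem ceilDiv_mul_ge (n m : Nat) (hm : 0 < m) : n ≤ ceilDiv n m * m := by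
  unfold ceilDiv
  have h1 := Nat.lt_div_mul_add (a := n + m - 1) hm
  omega

theorem ceilDiv_mul_lt (n m : Nat) (hm : 0 < m) : ceilDiv n m * m < n + m := by
  unfold ceilDiv
  have h1 := Nat.div_mul_le_self (n + m - 1) m
  omega

-- the take of the replicated list grows by exactly the cyclic element
theorem take_replicate_succ {α : Type} (b : List α) (hb : b ≠ []) (n : Nat) (d : α) :
    ((List.replicate (ceilDiv (n+1) b.length) b).flatten).take (n+1) =
      ((List.replicate (ceilDiv n b.length) b).flatten).take n ++ [b.getD (n % b.length) d] := by
  have hm : 0 < b.length := List.length_pos_iff.mpr hb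
  have hceil : ceilDiv n b.length ≤ ceilDiv (n+1) b.length := by
    unfold ceilDiv; exact Nat.div_le_div_right (by omega)
  have hge := ceilDiv_mul_ge (n+1) b.length hm
  have hgen := ceilDiv_mul_ge n b.length hm
  rw [List.take_add_one]
  congr 1
  · exact take_flatten_replicate_mono b n _ _ hceil hgen
  · rw [flatten_replicate_getElem? b hb _ n (by omega)]
    have hlt : n % b.length < b.length := Nat.mod_lt _ hm
    rw [List.getElem?_eq_getElem hlt]
    simp [List.getD_eq_getElem?_getD, List.getElem?_eq_getElem hlt]

-- s[:n] for a Nat-cast n is take n (cast-normalised form of PySem.List.slice_to)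
theorem slice_natCast' {α : Type} (xs : List α) (n : Nat) :
    PySem.List.slice xs none (some (n : Int)) = xs.take n := by
  have h := PySem.List.slice_to xs (b := (n : Int)) (by positivity)
  simp [h]

-- B's Int ceiling division equals Nat ceilDiv on nonnegative numerators
theorem neg_floordiv_neg_eq_ceilDiv (n m : Nat) (hm : 0 < m) :
    -(PySem.Int.floordiv (-(n : Int)) (m : Int)) = (ceilDiv n m : Int) := by
  rw [PySem.Int.neg_floordiv_neg_eq_iff_of_pos (by exact_mod_cast hm)]
  have h1 := ceilDiv_mul_ge n m hm
  have h2 := ceilDiv_mul_lt n m hm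
  constructor
  · push_cast at h2 ⊢; nlinarith
  · exact_mod_cast h1

-- B at a nonnegative size, in Nat form
theorem alt_natCast (n : Nat) :
    create_test_data_alt (n : Int) =
      (((List.replicate (ceilDiv n baseSentences.length) baseSentences).flatten).take n,
       ((List.replicate (ceilDiv n baseLabels.length) baseLabels).flatten).take n) := by
  simp only [create_test_data_alt, pyListMul]
  rw [neg_floordiv_neg_eq_ceilDiv n baseSentences.length (by decide),
      neg_floordiv_neg_eq_ceilDiv n baseLabels.length (by decide),
      slice_natCast', slice_natCast']
  simp

-- main equality on naturals, by induction peeling the last loop iteration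
theorem equal_on_nat (n : Nat) : create_test_data (n : Int) = create_test_data_alt (n : Int) := by
  induction n with
  | zero => decide
  | succ n ih =>
    rw [alt_natCast]
    simp only [create_test_data]
    push_cast
    rw [PySem.List.pyRange_one_succ_right (by exact_mod_cast Int.natCast_nonneg n),
        List.foldl_append]
    have hA : (PySem.List.pyRange 0 (n : Int) 1).foldl
        (fun (acc : (List (String × String)) × List String) i =>
          let sentence_pair := PySem.List.pyGetD baseSentences (PySem.Int.mod i (baseSentences.length : Int)) ("", "")
          (acc.1 ++ [sentence_pair],
           acc.2 ++ [PySem.List.pyGetD baseLabels (PySem.Int.mod i (baseLabels.length : Int)) ""]))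
        ([], []) = create_test_data_alt (n : Int) := by
      rw [← ih]; rfl
    rw [hA, alt_natCast,
        take_replicate_succ baseSentences (by decide) n ("", ""),
        take_replicate_succ baseLabels (by decide) n ""]
    simp only [List.foldl_cons, List.foldl_nil]
    have hs : PySem.Int.mod (n : Int) (baseSentences.length : Int) = ((n % baseSentences.length : Nat) : Int) :=
      PySem.Int.mod_natCast n _
    have hl : PySem.Int.mod (n : Int) (baseLabels.length : Int) = ((n % baseLabels.length : Nat) : Int) :=
      PySem.Int.mod_natCast n _
    rw [hs, hl, PySem.List.pyGetD_natCast, PySem.List.pyGetD_natCast]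

-- both sides are empty for negative sizes
theorem equal_on_neg (size : Int) (h : size < 0) :
    create_test_data size = create_test_data_alt size := by
  simp only [create_test_data, create_test_data_alt, pyListMul]
  rw [PySem.List.pyRange_one_eq_nil (by omega)]
  have hrep : ∀ (m : Int), 0 < m → (-(PySem.Int.floordiv (-size) m)).toNat = 0 := by
    intro m hm
    have hq : 0 ≤ PySem.Int.floordiv (-size) m := by
      by_contra hneg
      push Not at hneg
      have heq := PySem.Int.floordiv_mul_add_mod (-size) m
      have hr1 := PySem.Int.mod_nonneg (-size) hm
      have hr2 := PySem.Int.mod_lt (-size) hm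
      nlinarith
    omega
  rw [hrep _ (by decide), hrep _ (by decide)]
  simp [PySem.List.slice]

-- ===== VERDICT (by name: the statement is the Claim_ definition above) =====
theorem create_test_data_spec : Claim_equal_create_test_data := by
  intro size _
  unfold Spec_create_test_data
  by_cases h : 0 ≤ size
  · obtain ⟨n, rfl⟩ := Int.eq_ofNat_of_zero_le h
    exact equal_on_nat n
  · exact equal_on_neg size (by omega)
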